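-- pv_equiv track=rewrite | github.com/belalakhter/smart_research_agent | app/rag/rag_processing.py | _take_overlap_units
-- ===== SOURCE A (Python) =====
-- def _take_overlap_units(units: list[str], overlap: int) -> list[str]:
--     if overlap <= 0 or not units:
--         return []
--
--     selected: list[str] = []
--     total = 0
--     for unit in reversed(units):
--         separator_len = 2 if selected else 0
--         projected = total + separator_len + len(unit)
--         if selected and projected > overlap:
--             break
--         selected.append(unit)
--         total = projected
--         if total >= overlap:
--             break
--
--     return list(reversed(selected))
-- ===== SOURCE B (Python) =====
-- def _take_overlap_units(units: list[str], overlap: int) -> list[str]: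
--     if overlap <= 0 or not units:
--         return []
--     # Cumulative suffix costs: costs[i] = (sum of lengths of last i+1 units) + 2*i.
--     costs: list[int] = []
--     acc = 0
--     for u in reversed(units):
--         acc = acc + len(u) + (2 if costs else 0)
--         costs.append(acc)
--     # costs is strictly increasing; binary-search the largest m with costs[m-1] <= overlap.
--     lo, hi = 0, len(costs)
--     while lo < hi:
--         mid = (lo + hi) // 2
--         if costs[mid] <= overlap:
--             lo = mid + 1
--         else:
--             hi = mid
--     m = max(lo, 1)  # the last unit is always kept, even if it alone exceeds overlap
--     return units[len(units) - m:]
-- ===== Notes on version B (the rewrite author's own statement) =====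
-- stated objective: alternative
-- what changed: Replaces A's single greedy scan with two early 'break's by precomputing the strictly increasing cumulative suffix-cost table and binary-searching it for the largest unit count whose cost fits the overlap budget (always keeping at least the last unit), then slicing units once.
import Mathlib
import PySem

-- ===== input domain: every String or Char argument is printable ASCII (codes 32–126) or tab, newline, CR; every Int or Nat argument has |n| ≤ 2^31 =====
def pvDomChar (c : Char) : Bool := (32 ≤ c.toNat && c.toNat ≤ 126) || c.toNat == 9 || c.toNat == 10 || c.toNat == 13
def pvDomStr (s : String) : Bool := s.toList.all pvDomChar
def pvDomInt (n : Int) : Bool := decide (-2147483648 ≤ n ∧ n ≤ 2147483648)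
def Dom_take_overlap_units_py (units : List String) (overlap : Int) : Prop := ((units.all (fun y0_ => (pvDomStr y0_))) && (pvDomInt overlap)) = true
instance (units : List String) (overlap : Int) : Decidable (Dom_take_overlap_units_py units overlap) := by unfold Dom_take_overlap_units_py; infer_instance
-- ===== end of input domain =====

-- B replaces A's break-out greedy scan by a precomputed strictly increasing
-- cumulative-cost table plus a hand-written binary search for the cutoff
-- (objective: alternative decomposition, same asymptotic cost).

-- ===== PORT A =====
-- the for-loop over reversed(units) with its two `break`s, state (selected, total)
def aLoop (overlap : Int) : List String → List String → Int → List String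
  | [], selected, _ => selected
  | u :: rest, selected, total =>
    let separator_len : Int := if selected ≠ [] then 2 else 0
    let projected := total + separator_len + (PySem.Str.len u : Int)
    if selected ≠ [] ∧ projected > overlap then selected
    else if projected ≥ overlap then selected ++ [u]
    else aLoop overlap rest (selected ++ [u]) projected

def take_overlap_units_py (units : List String) (overlap : Int) : List String :=
  if overlap ≤ 0 ∨ units = [] then []
  else (aLoop overlap units.reverse [] 0).reverse

-- ===== PORT B =====
-- the cost-table building loop of Source B: acc, costs with costs.append(acc)
def bCosts : List String → Int → List Int → List Int
  | [], _, costs => costs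
  | u :: rest, acc, costs =>
    let acc' := acc + (PySem.Str.len u : Int) + (if costs ≠ [] then 2 else 0)
    bCosts rest acc' (costs ++ [acc'])

-- Source B's hand-written binary search (costs[mid] read with getD 0; mid is
-- always in range when called as below, so this is exact)
def bSearch (costs : List Int) (overlap : Int) (lo hi : Nat) : Nat :=
  if h : lo < hi then
    let mid := (lo + hi) / 2
    if costs.getD mid 0 ≤ overlap then bSearch costs overlap (mid + 1) hi
    else bSearch costs overlap lo mid
  else lo
termination_by hi - lo
decreasing_by all_goals omega

def take_overlap_units_py_alt (units : List String) (overlap : Int) : List String :=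
  if overlap ≤ 0 ∨ units = [] then []
  else
    let costs := bCosts units.reverse 0 []
    let m := max (bSearch costs overlap 0 costs.length) 1
    units.drop (units.length - m)

-- ===== PRECONDITION & SPEC =====
def Spec_take_overlap_units_py (units : List String) (overlap : Int) (out : List String) : Prop := out = take_overlap_units_py_alt units overlap
instance (units : List String) (overlap : Int) (out : List String) : Decidable (Spec_take_overlap_units_py units overlap out) := by unfold Spec_take_overlap_units_py; infer_instance

-- ===== CLAIM (what is proved, stated in full; the proofs are below) =====
def Claim_equal_take_overlap_units_py : Prop := ∀ (units : List String) (overlap : Int), Dom_take_overlap_units_py units overlap → Spec_take_overlap_units_py units overlap (take_overlap_units_py units overlap)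

-- ===== LEMMAS AND PROOFS =====

-- cumulative costs of taking further units after the first, starting from total `acc`
def costsFrom (acc : Int) : List String → List Int
  | [] => []
  | u :: r => (acc + (PySem.Str.len u : Int) + 2) :: costsFrom (acc + (PySem.Str.len u : Int) + 2) r

theorem length_costsFrom (l : List String) : ∀ acc, (costsFrom acc l).length = l.length := by
  induction l with
  | nil => intro acc; rfl
  | cons u r ih => intro acc; simp [costsFrom, ih]

theorem costsFrom_gt (l : List String) : ∀ acc, ∀ x ∈ costsFrom acc l, acc < x := by
  induction l with
  | nil => intro acc x hx; simp [costsFrom] at hx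
  | cons u r ih =>
    intro acc x hx
    simp only [costsFrom, List.mem_cons] at hx
    rcases hx with h | h
    · have : (0:Int) ≤ (PySem.Str.len u : Int) := Int.natCast_nonneg _
      omega
    · have h1 := ih _ x h
      have : (0:Int) ≤ (PySem.Str.len u : Int) := Int.natCast_nonneg _
      omega

theorem costsFrom_pairwise (l : List String) : ∀ acc, List.Pairwise (· < ·) (costsFrom acc l) := by
  induction l with
  | nil => intro acc; simp [costsFrom]
  | cons u r ih =>
    intro acc
    refine List.pairwise_cons.mpr ⟨fun x hx => costsFrom_gt _ _ _ hx, ih _⟩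

theorem bCosts_ne_nil (l : List String) : ∀ acc cs, cs ≠ [] → bCosts l acc cs = cs ++ costsFrom acc l := by
  induction l with
  | nil => intro acc cs _; simp [bCosts, costsFrom]
  | cons u r ih =>
    intro acc cs hcs
    simp only [bCosts, if_pos hcs, costsFrom]
    rw [ih _ _ (by simp)]
    simp

theorem bCosts_top (u : String) (rest : List String) :
    bCosts (u :: rest) 0 [] = ((PySem.Str.len u : Int)) :: costsFrom ((PySem.Str.len u : Int)) rest := by
  have h0 : (0 : Int) + (PySem.Str.len u : Int) + (if ([] : List Int) ≠ [] then (2:Int) else 0) = (PySem.Str.len u : Int) := by simp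
  simp only [bCosts]
  rw [h0, bCosts_ne_nil _ _ _ (by simp)]
  simp

-- the non-empty phase of A's loop selects exactly the takeWhile-prefix of the cost tail
theorem aLoop_ne (overlap : Int) (rest : List String) :
    ∀ sel t, sel ≠ [] → t < overlap →
    aLoop overlap rest sel t =
      sel ++ rest.take ((costsFrom t rest).takeWhile (fun c => decide (c ≤ overlap))).length := by
  induction rest with
  | nil => intro sel t _ _; simp [aLoop, costsFrom]
  | cons u r ih =>
    intro sel t hsel ht
    have hlen : (0:Int) ≤ ((u.toList.length : Nat) : Int) := Int.natCast_nonneg _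
    simp only [aLoop, if_pos hsel, costsFrom, List.takeWhile_cons, PySem.Str.len_eq]
    have heq : t + 2 + ((u.toList.length : Nat) : Int) = t + ((u.toList.length : Nat) : Int) + 2 := by ring
    by_cases hgt : t + ((u.toList.length : Nat) : Int) + 2 > overlap
    · rw [if_pos ⟨hsel, by omega⟩]
      rw [if_neg (by simpa using (by omega : ¬ (t + ((u.toList.length : Nat) : Int) + 2 ≤ overlap)))]
      simp
    · rw [if_neg (by push Not; intro _; omega)]
      have hle : t + ((u.toList.length : Nat) : Int) + 2 ≤ overlap := by omega
      simp only [decide_eq_true_eq, if_pos hle]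
      by_cases hge : t + 2 + ((u.toList.length : Nat) : Int) ≥ overlap
      · rw [if_pos hge]
        -- total hit overlap exactly; the next cost already exceeds overlap
        have htail : ((costsFrom (t + ((u.toList.length : Nat) : Int) + 2) r).takeWhile
            (fun c => decide (c ≤ overlap))) = [] := by
          cases hr : costsFrom (t + ((u.toList.length : Nat) : Int) + 2) r with
          | nil => simp
          | cons c cs =>
            have hc : t + ((u.toList.length : Nat) : Int) + 2 < c := by
              have := costsFrom_gt r (t + ((u.toList.length : Nat) : Int) + 2) c (by rw [hr]; simp)
              exact this
            simp [show ¬ (c ≤ overlap) by omega]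
        rw [htail]
        simp
      · rw [if_neg hge]
        rw [ih (sel ++ [u]) _ (by simp) (by omega)]
        rw [heq]
        simp [List.take_succ_cons]

-- takeWhile on a strictly increasing list: everything before the cut is ≤ ov,
-- everything from the cut on is > ov
theorem takeWhile_lt_of_lt (costs : List Int) (ov : Int) :
    ∀ i, i < ((costs.takeWhile (fun c => decide (c ≤ ov))).length) → costs.getD i 0 ≤ ov := by
  induction costs with
  | nil => intro i h; simp at h
  | cons c cs ih =>
    intro i h
    rw [List.takeWhile_cons] at h
    by_cases hc : c ≤ ov
    · simp [hc] at h
      cases i with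
      | zero => simpa using hc
      | succ j => exact ih j (by omega)
    · simp [hc] at h

theorem takeWhile_ge_of_ge (costs : List Int) (ov : Int) (hmono : List.Pairwise (· < ·) costs) :
    ∀ i, ((costs.takeWhile (fun c => decide (c ≤ ov))).length) ≤ i → i < costs.length →
      ov < costs.getD i 0 := by
  induction costs with
  | nil => intro i _ h; simp at h
  | cons c cs ih =>
    intro i hT hi
    rw [List.takeWhile_cons] at hT
    rcases List.pairwise_cons.mp hmono with ⟨hhead, htail⟩
    by_cases hc : c ≤ ov
    · simp [hc] at hT
      cases i with
      | zero => omega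
      | succ j => exact ih htail j (by omega) (by simpa using hi)
    · -- head already fails: every element is ≥ c > ov
      cases i with
      | zero => simpa using (by omega : ov < c)
      | succ j =>
        have hj : j < cs.length := by simpa using hi
        have : c < cs.getD j 0 := by
          have hmem : cs.getD j 0 ∈ cs := by
            rw [List.getD_eq_getElem?_getD, List.getElem?_eq_getElem hj]
            exact List.getElem_mem _
          exact hhead _ hmem
        simp only [List.getD_cons_succ]
        omega

theorem bSearch_eq (costs : List Int) (ov : Int) (T : Nat)
    (ha : ∀ i, i < T → costs.getD i 0 ≤ ov)
    (hb : ∀ i, T ≤ i → i < costs.length → ov < costs.getD i 0) :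
    ∀ n lo hi, hi - lo ≤ n → lo ≤ T → T ≤ hi → hi ≤ costs.length → bSearch costs ov lo hi = T := by
  intro n
  induction n with
  | zero =>
    intro lo hi h1 h2 h3 _
    rw [bSearch]
    rw [dif_neg (by omega)]
    omega
  | succ n ih =>
    intro lo hi h1 h2 h3 h4
    rw [bSearch]
    by_cases hlh : lo < hi
    · rw [dif_pos hlh]
      simp only
      set mid := (lo + hi) / 2 with hmid
      have hmidlo : lo ≤ mid := by omega
      have hmidhi : mid < hi := by omega
      by_cases hc : costs.getD mid 0 ≤ ov
      · rw [if_pos hc]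
        have hmT : mid < T := by
          by_contra hnot
          exact absurd hc (by have := hb mid (by omega) (by omega); omega)
        exact ih (mid + 1) hi (by omega) (by omega) h3 h4
      · rw [if_neg hc]
        have hmT : T ≤ mid := by
          by_contra hnot
          exact hc (ha mid (by omega))
        exact ih lo mid (by omega) h2 hmT (by omega)
    · rw [dif_neg hlh]; omega

theorem bSearch_takeWhile (costs : List Int) (ov : Int) (hmono : List.Pairwise (· < ·) costs) :
    bSearch costs ov 0 costs.length = (costs.takeWhile (fun c => decide (c ≤ ov))).length := by
  have hTlen : (costs.takeWhile (fun c => decide (c ≤ ov))).length ≤ costs.length :=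
    (costs.takeWhile_prefix _).length_le
  exact bSearch_eq costs ov _ (takeWhile_lt_of_lt costs ov) (takeWhile_ge_of_ge costs ov hmono)
    costs.length 0 costs.length (by omega) (by omega) hTlen (le_refl _)

-- reversal bridge: the first M of the reversed list, reversed back, is the last M
theorem reverse_take_eq_drop (xs : List α) (M : Nat) (_h : M ≤ xs.length) :
    (xs.reverse.take M).reverse = xs.drop (xs.length - M) := by
  rw [List.take_reverse]
  simp

-- ===== VERDICT (by name: the statement is the Claim_ definition above) =====
theorem take_overlap_units_py_spec : Claim_equal_take_overlap_units_py := by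
  intro units overlap _
  unfold Spec_take_overlap_units_py take_overlap_units_py take_overlap_units_py_alt
  by_cases hguard : overlap ≤ 0 ∨ units = []
  · simp [hguard]
  · rw [if_neg hguard, if_neg hguard]
    push Not at hguard
    obtain ⟨hov, hne⟩ := hguard
    obtain ⟨l, rest, hrev⟩ : ∃ l rest, units.reverse = l :: rest := by
      cases h : units.reverse with
      | nil => exact absurd (by simpa using h) hne
      | cons a b => exact ⟨a, b, rfl⟩
    rw [hrev]
    rw [bCosts_top]
    dsimp only
    set L : Int := (PySem.Str.len l : Int) with hL
    have hL0 : (0:Int) ≤ L := Int.natCast_nonneg _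
    have hlenrev : units.length = rest.length + 1 := by
      have := congrArg List.length hrev
      simpa using this
    have hmono : List.Pairwise (· < ·) (L :: costsFrom L rest) :=
      List.pairwise_cons.mpr ⟨fun x hx => costsFrom_gt _ _ _ hx, costsFrom_pairwise _ _⟩
    rw [bSearch_takeWhile _ _ hmono]
    -- unfold A's first iteration
    simp only [aLoop, List.nil_append]
    rw [if_neg (by simp)]
    have hproj : (0:Int) + (if ([] : List String) ≠ [] then (2:Int) else 0) + (PySem.Str.len l : Int) = L := by simp [hL]
    rw [hproj]
    by_cases hfirst : L ≥ overlap
    · rw [if_pos hfirst]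
      -- A keeps only the last unit; the cost table admits at most its first entry
      have hm : max ((L :: costsFrom L rest).takeWhile (fun c => decide (c ≤ overlap))).length 1 = 1 := by
        rw [List.takeWhile_cons]
        by_cases hLov : L ≤ overlap
        · have hLeq : L = overlap := le_antisymm hLov hfirst
          have htail : ((costsFrom L rest).takeWhile (fun c => decide (c ≤ overlap))) = [] := by
            cases hr : costsFrom L rest with
            | nil => simp
            | cons c cs =>
              have hc : L < c := costsFrom_gt rest L c (by rw [hr]; simp)
              simp [show ¬ (c ≤ overlap) by omega]
          simp [hLov, htail]
        · simp [hLov]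
      rw [hm]
      have : units.drop (units.length - 1) = [l] := by
        have hu : units = rest.reverse ++ [l] := by
          have := congrArg List.reverse hrev
          simpa using this
        rw [hu]
        rw [show (rest.reverse ++ [l]).length - 1 = rest.reverse.length by simp]
        exact List.drop_left
      rw [this]
      simp
    · rw [if_neg hfirst]
      have hLlt : L < overlap := by omega
      rw [aLoop_ne overlap rest [l] L (by simp) hLlt]
      set k := ((costsFrom L rest).takeWhile (fun c => decide (c ≤ overlap))).length with hk
      have hkle : k ≤ rest.length := by
        have := ((costsFrom L rest).takeWhile_prefix (fun c => decide (c ≤ overlap))).length_le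
        simpa [length_costsFrom] using this
      have hT : ((L :: costsFrom L rest).takeWhile (fun c => decide (c ≤ overlap))).length = k + 1 := by
        rw [List.takeWhile_cons]
        simp [show L ≤ overlap by omega, hk]
      rw [hT]
      have hmax : max (k + 1) 1 = k + 1 := by omega
      rw [hmax]
      have hA : ([l] ++ rest.take k) = (l :: rest).take (k + 1) := by simp
      rw [hA]
      have : (l :: rest) = units.reverse := hrev.symm
      rw [this]
      exact reverse_take_eq_drop units (k + 1) (by omega)
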